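-- pv_equiv track=rewrite | github.com/s-tefan/aoc2021 | 03/aoc2021_03.py | partone
-- ===== SOURCE A (Python) =====
-- def partone(input):
--     stripped_input = [k.strip() for k in input]
--     n = len(input)
--     tr = zip(*stripped_input)
--     ones = list(map(lambda x : x.count('1'), tr))
--     delta, epsilon = 0, 0
--     for k in ones:
--         delta <<= 1
--         epsilon <<= 1
--         if k >= n-k:
--             delta |= 1
--         else:
--             epsilon |= 1
--     return epsilon*delta
-- ===== SOURCE B (Python) =====
-- def partone(input):
--     rows = [s.strip() for s in input]
--     n = len(input)
--     m = min(map(len, rows), default=0)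
--     delta = 0
--     for i in range(m):
--         # majority bit of a 0/1 column == median of the sorted column
--         # (ties 2k == n give 1, matching the >= rule, since sorted[n//2] is a 1)
--         col = sorted(1 if r[i] == '1' else 0 for r in rows)
--         delta = 2 * delta + col[n // 2]
--     epsilon = (1 << m) - 1 - delta
--     return epsilon * delta
-- ===== Notes on version B (the rewrite author's own statement) =====
-- stated objective: alternative
-- what changed: Replaces per-column one-counting with the threshold test k >= n-k by a sort-and-select: each column's 0/1 bits are sorted and the majority bit is read off as the median element col[n//2], and epsilon is the closed-form complement (1<<m)-1-delta instead of a parallel shift-or accumulator.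
import Mathlib
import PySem

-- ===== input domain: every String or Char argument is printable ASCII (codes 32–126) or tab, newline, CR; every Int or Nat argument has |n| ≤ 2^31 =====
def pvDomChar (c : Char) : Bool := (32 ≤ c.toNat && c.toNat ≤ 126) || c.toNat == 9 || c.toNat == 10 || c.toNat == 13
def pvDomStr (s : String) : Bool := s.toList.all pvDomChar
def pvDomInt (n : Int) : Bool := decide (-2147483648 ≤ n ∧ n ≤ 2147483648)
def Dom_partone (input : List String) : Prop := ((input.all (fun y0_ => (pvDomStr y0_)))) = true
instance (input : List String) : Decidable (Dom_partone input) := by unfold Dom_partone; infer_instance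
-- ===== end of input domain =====

-- B replaces the count-and-threshold majority test by sort-and-select (the majority bit of a
-- 0/1 column is the median element of the sorted column) and derives epsilon as the
-- closed-form complement (1<<m)-1-delta (alternative).

-- ===== PORT A =====
-- zip(*strings): truncating column-wise transpose (Python zip semantics, exact)
def pyZipChars : List (List Char) → List (List Char)
  | [] => []
  | [] :: _ => []
  | (x :: xs) :: rest =>
      if rest.all (fun r => !r.isEmpty) then
        (x :: rest.map (fun r => r.headD ' ')) :: pyZipChars (xs :: rest.map (fun r => r.tail))
      else []
termination_by xss => (xss.headD []).length
decreasing_by simp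

def partone (input : List String) : Int :=
  let stripped := input.map (fun k => PySem.Str.strip k)
  let n : Int := input.length
  let tr := pyZipChars (stripped.map String.toList)
  let ones := tr.map (fun x => (x.count '1' : Int))
  let de := ones.foldl (fun (p : Int × Int) k =>
      let d := p.1 * 2
      let e := p.2 * 2
      if k ≥ n - k then (d + 1, e) else (d, e + 1)) ((0 : Int), (0 : Int))
  de.2 * de.1

-- ===== PORT B =====
-- min(map(len, rows), default=0)
def pyMinD0 (xs : List Nat) : Nat :=
  match xs with
  | [] => 0
  | x :: rest => rest.foldl Nat.min x

def partone_alt (input : List String) : Int :=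
  let rows := input.map (fun s => (PySem.Str.strip s).toList)
  let n := input.length
  let m := pyMinD0 (rows.map List.length)
  -- r[i] with i < m ≤ len r and col[n//2] with n//2 < n = len col are always in range,
  -- so pyGetD is exact here
  let delta := (List.range m).foldl (fun (d : Int) (i : Nat) =>
      let col := PySem.List.sorted
        (rows.map (fun r => if PySem.List.pyGetD r (i : Int) ' ' = '1' then (1 : Int) else 0))
        (fun x => x) false
      2 * d + PySem.List.pyGetD col ((n / 2 : Nat) : Int) 0) 0
  let epsilon := (2 ^ m : Int) - 1 - delta
  epsilon * delta

-- ===== PRECONDITION & SPEC =====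
def Spec_partone (input : List String) (out : Int) : Prop := out = partone_alt input
instance (input : List String) (out : Int) : Decidable (Spec_partone input out) := by unfold Spec_partone; infer_instance

-- ===== CLAIM (what is proved, stated in full; the proofs are below) =====
def Claim_equal_partone : Prop := ∀ (input : List String), Dom_partone input → Spec_partone input (partone input)

-- ===== LEMMAS AND PROOFS =====

theorem pv_foldl_min_zero (l : List Nat) : l.foldl Nat.min 0 = 0 := by
  induction l with
  | nil => rfl
  | cons b l ih => simpa using ih

theorem pv_foldl_min_mem_zero (l : List Nat) (a : Nat) (h : 0 ∈ l) :
    l.foldl Nat.min a = 0 := by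
  induction l generalizing a with
  | nil => simp at h
  | cons b l ih =>
    rcases List.mem_cons.1 h with hb | hl
    · subst hb; simpa using pv_foldl_min_zero l
    · exact ih _ hl

theorem pv_foldl_min_ge (l : List Nat) (a c : Nat) (ha : c ≤ a)
    (hl : ∀ x ∈ l, c ≤ x) : c ≤ l.foldl Nat.min a := by
  induction l generalizing a with
  | nil => simpa using ha
  | cons b l ih =>
    exact ih _ (le_min ha (hl b (List.mem_cons_self))) (fun x hx => hl x (List.mem_cons_of_mem _ hx))

theorem pv_foldl_min_sub (l : List Nat) (a : Nat) :
    (l.map (fun x => x - 1)).foldl Nat.min (a - 1) = l.foldl Nat.min a - 1 := by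
  induction l generalizing a with
  | nil => rfl
  | cons b l ih =>
    simp only [List.map_cons, List.foldl_cons]
    have h1 : Nat.min a b - 1 = Nat.min (a - 1) (b - 1) := by
      rcases Nat.le_total a b with h | h <;> simp [Nat.min_def, h] <;> omega
    rw [← h1, ih]

theorem pv_getD_zero_headD (r : List Char) : r.getD 0 ' ' = r.headD ' ' := by
  cases r <;> rfl

theorem pv_getD_succ_tail (r : List Char) (i : Nat) : r.tail.getD i ' ' = r.getD (i + 1) ' ' := by
  cases r <;> rfl

theorem pyZipChars_eq (xss : List (List Char)) :
    pyZipChars xss =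
      (List.range (pyMinD0 (xss.map List.length))).map
        (fun i => xss.map (fun r => r.getD i ' ')) := by
  fun_induction pyZipChars xss with
  | case1 => simp [pyMinD0]
  | case2 rest =>
    have h0 : pyMinD0 ((0 : Nat) :: rest.map List.length) = 0 :=
      pv_foldl_min_zero (rest.map List.length)
    simp [h0]
  | case3 x xs rest hall ih =>
    have hall' : ∀ r ∈ rest, r ≠ [] := by
      intro r hr
      have := List.all_eq_true.1 hall r hr
      simpa using this
    set m := pyMinD0 (((x :: xs) :: rest).map List.length) with hm
    have hm1 : 1 ≤ m := by
      rw [hm]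
      simp only [pyMinD0, List.map_cons, List.length_cons]
      apply pv_foldl_min_ge
      · omega
      · intro y hy
        rcases List.mem_map.1 hy with ⟨r, hr, rfl⟩
        have := hall' r hr
        cases r with
        | nil => exact absurd rfl this
        | cons _ _ => simp
    obtain ⟨m', hm' ⟩ : ∃ m', m = m' + 1 := ⟨m - 1, by omega⟩
    have htail : pyMinD0 ((xs :: rest.map List.tail).map List.length) = m' := by
      simp only [pyMinD0, List.map_cons, List.map_map]
      have h1 : rest.map (List.length ∘ List.tail) = (rest.map List.length).map (fun x => x - 1) := by
        simp [List.map_map, Function.comp]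
      rw [h1]
      have h2 : xs.length = (x :: xs).length - 1 := by simp
      rw [h2, pv_foldl_min_sub]
      have : m = (rest.map List.length).foldl Nat.min ((x :: xs).length) := by
        rw [hm]; rfl
      omega
    simp only [List.map_subtype, List.unattach_attach] at ih
    rw [ih, htail, hm', List.range_succ_eq_map]
    simp only [List.map_cons, List.map_map]
    congr 1
    · simp only [List.getD_cons_zero]
      congr 1
      exact List.map_congr_left (fun r _ => (pv_getD_zero_headD r).symm)
    · apply List.map_congr_left
      intro i _
      simp only [Function.comp]
      congr 1
      exact List.map_congr_left (fun r _ => pv_getD_succ_tail r i)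
  | case4 x xs rest hall =>
    have : ∃ r ∈ rest, r = [] := by
      rcases List.all_eq_false.mp (Bool.not_eq_true _ ▸ hall) with ⟨r, hr, h⟩
      exact ⟨r, hr, by simpa using h⟩
    rcases this with ⟨r, hr, rfl⟩
    have h0 : (0 : Nat) ∈ (rest.map List.length) := List.mem_map.2 ⟨[], hr, rfl⟩
    have : pyMinD0 (((x :: xs) :: rest).map List.length) = 0 := by
      simp only [pyMinD0, List.map_cons]
      exact pv_foldl_min_mem_zero _ _ h0
    rw [this]
    simp

-- a 0/1 list is a permutation of its zeros followed by its ones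
theorem pv_perm01 (L : List Int) (h : ∀ x ∈ L, x = 0 ∨ x = 1) :
    (List.replicate (L.count 0) (0 : Int) ++ List.replicate (L.count 1) 1).Perm L := by
  induction L with
  | nil => simp
  | cons a L ih =>
    have ha := h a (List.mem_cons_self)
    have ih' := ih (fun x hx => h x (List.mem_cons_of_mem _ hx))
    rcases ha with rfl | rfl
    · rw [show List.count (0:Int) (0 :: L) = L.count 0 + 1 by simp,
        show List.count (1:Int) (0 :: L) = L.count 1 by simp,
        List.replicate_succ, List.cons_append]
      exact ih'.cons 0
    · rw [show List.count (0:Int) (1 :: L) = L.count 0 by simp,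
        show List.count (1:Int) (1 :: L) = L.count 1 + 1 by simp,
        List.replicate_succ]
      exact (List.perm_middle).trans (ih'.cons 1)

theorem pv_count01_len (L : List Int) (h : ∀ x ∈ L, x = 0 ∨ x = 1) :
    L.count 0 + L.count 1 = L.length := by
  induction L with
  | nil => rfl
  | cons a L ih =>
    have ih' := ih (fun x hx => h x (List.mem_cons_of_mem _ hx))
    rcases h a (List.mem_cons_self) with rfl | rfl <;>
      simp only [List.length_cons] <;> simp <;> omega

theorem pv_pairwise01 (z k : Nat) :
    (List.replicate z (0 : Int) ++ List.replicate k 1).Pairwise (· ≤ ·) := by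
  rw [List.pairwise_append]
  refine ⟨List.pairwise_replicate.2 (by simp), List.pairwise_replicate.2 (by simp), ?_⟩
  intro x hx y hy
  rw [List.eq_of_mem_replicate hx, List.eq_of_mem_replicate hy]
  norm_num

theorem pv_getD_rep01 (z k j : Nat) (hj : j < z + k) :
    (List.replicate z (0 : Int) ++ List.replicate k 1).getD j 0 = if j < z then 0 else 1 := by
  by_cases hz : j < z
  · rw [if_pos hz, List.getD_eq_getElem _ _ (by simp; omega), List.getElem_append_left (by simpa)]
    simp
  · rw [if_neg hz, List.getD_eq_getElem _ _ (by simp; omega),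
      List.getElem_append_right (by simpa using hz)]
    simp

-- indicator count equals the character count in the column
theorem pv_count_map_ind (rows : List (List Char)) (i : Nat) :
    (rows.map (fun r => if r.getD i ' ' = '1' then (1 : Int) else 0)).count 1
      = (rows.map (fun r => r.getD i ' ')).count '1' := by
  induction rows with
  | nil => rfl
  | cons r rows ih =>
    simp only [List.map_cons, List.count_cons, ih, beq_iff_eq]
    by_cases h : r.getD i ' ' = '1'
    · simp only [if_pos h]; simp
    · simp only [if_neg h]; simp

-- the median of the sorted 0/1 column is the majority indicator
theorem pv_median_col (rows : List (List Char)) (hne : rows ≠ []) (i : Nat) :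
    PySem.List.pyGetD
      (PySem.List.sorted
        (rows.map (fun r => if PySem.List.pyGetD r (i : Int) ' ' = '1' then (1 : Int) else 0))
        (fun x => x) false)
      ((rows.length / 2 : Nat) : Int) 0
    = (if ((rows.map (fun r => r.getD i ' ')).count '1' : Int)
          ≥ (rows.length : Int) - (rows.map (fun r => r.getD i ' ')).count '1'
       then 1 else 0) := by
  set bits : List Int := rows.map (fun r => if r.getD i ' ' = '1' then (1 : Int) else 0) with hbits
  have hb : rows.map (fun r => if PySem.List.pyGetD r (i : Int) ' ' = '1' then (1 : Int) else 0)
      = bits := List.map_congr_left (fun r _ => by rw [PySem.List.pyGetD_natCast])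
  have h01 : ∀ x ∈ bits, x = 0 ∨ x = 1 := by
    intro x hx
    rcases List.mem_map.1 hx with ⟨r, _, rfl⟩
    by_cases h : r.getD i ' ' = '1'
    · right; rw [if_pos h]
    · left; rw [if_neg h]
  set z := bits.count 0 with hz
  set k := bits.count 1 with hk
  have hsorted : PySem.List.sorted bits (fun x => x) false
      = List.replicate z (0 : Int) ++ List.replicate k 1 :=
    PySem.List.sorted_id_eq_of_perm_of_pairwise bits _ (pv_perm01 bits h01) (pv_pairwise01 z k)
  have hlen : z + k = rows.length := by
    have := pv_count01_len bits h01
    simp only [hbits, List.length_map] at this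
    omega
  have hn1 : 1 ≤ rows.length := List.length_pos_iff.2 hne
  have hjr : rows.length / 2 < z + k := by omega
  rw [hb, hsorted, PySem.List.pyGetD_natCast, pv_getD_rep01 z k _ hjr]
  have hkc : k = (rows.map (fun r => r.getD i ' ')).count '1' := by
    rw [hk, hbits]; exact pv_count_map_ind rows i
  rw [← hkc]
  by_cases hcond : ((k : Int) ≥ (rows.length : Int) - k)
  · rw [if_pos hcond, if_neg (by omega)]
  · rw [if_neg hcond, if_pos (by omega)]

-- A's paired fold splits into two independent folds
theorem pv_pair_fold (n : Int) (L : List Int) (d e : Int) :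
    L.foldl (fun (p : Int × Int) k =>
        if k ≥ n - k then (p.1 * 2 + 1, p.2 * 2) else (p.1 * 2, p.2 * 2 + 1)) (d, e)
      = (L.foldl (fun d k => if k ≥ n - k then d * 2 + 1 else d * 2) d,
         L.foldl (fun e k => if k ≥ n - k then e * 2 else e * 2 + 1) e) := by
  induction L generalizing d e with
  | nil => rfl
  | cons k L ih =>
    simp only [List.foldl_cons]
    by_cases h : k ≥ n - k
    · simp only [if_pos h]; exact ih _ _
    · simp only [if_neg h]; exact ih _ _

-- the two folds are complementary: dfold + efold = (d+e+1)·2^|L| − 1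
theorem pv_fold_compl (n : Int) (L : List Int) (d e : Int) :
    L.foldl (fun d k => if k ≥ n - k then d * 2 + 1 else d * 2) d
      + L.foldl (fun e k => if k ≥ n - k then e * 2 else e * 2 + 1) e
      = (d + e + 1) * 2 ^ L.length - 1 := by
  induction L generalizing d e with
  | nil => simp only [List.foldl_nil, List.length_nil, pow_zero]; ring
  | cons k L ih =>
    simp only [List.foldl_cons, List.length_cons]
    by_cases h : k ≥ n - k
    · rw [if_pos h, if_pos h, ih]; ring
    · rw [if_neg h, if_neg h, ih]; ring

-- ===== VERDICT (by name: the statement is the Claim_ definition above) =====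
theorem partone_spec : Claim_equal_partone := by
  intro input _
  unfold Spec_partone partone partone_alt
  set rows : List (List Char) := input.map (fun s => (PySem.Str.strip s).toList) with hrows
  have hA : (input.map (fun k => PySem.Str.strip k)).map String.toList = rows := by
    rw [List.map_map]; exact hrows.symm
  dsimp only
  rw [hA]
  set n : Int := (input.length : Int) with hn
  set m := pyMinD0 (rows.map List.length) with hm
  have hnr : rows.length = input.length := by simp [hrows]
  -- A's ones list, as a map over range m
  set L : List Int := (List.range m).map
      (fun i => ((rows.map (fun r => r.getD i ' ')).count '1' : Int)) with hL
  have hones : (pyZipChars rows).map (fun x => (x.count '1' : Int)) = L := by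
    rw [pyZipChars_eq, ← hm, List.map_map, hL]; rfl
  rw [hones, pv_pair_fold n L 0 0]
  -- A's delta fold over L equals B's fold over range m (median = majority indicator)
  have hdelta :
      L.foldl (fun d k => if k ≥ n - k then d * 2 + 1 else d * 2) (0 : Int)
        = (List.range m).foldl (fun (d : Int) (i : Nat) =>
            let col := PySem.List.sorted
              (rows.map (fun r => if PySem.List.pyGetD r (i : Int) ' ' = '1' then (1 : Int) else 0))
              (fun x => x) false
            2 * d + PySem.List.pyGetD col ((input.length / 2 : Nat) : Int) 0) 0 := by
    rw [hL, List.foldl_map]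
    rcases Nat.eq_zero_or_pos m with hm0 | hmpos
    · simp [hm0]
    · have hne : rows ≠ [] := by
        intro hnil
        rw [hnil] at hm
        simp [pyMinD0] at hm
        omega
      apply PySem.List.foldl_congr_mem
      intro d i hi
      have hmed := pv_median_col rows hne i
      rw [hnr] at hmed
      dsimp only
      rw [hmed, hn]
      by_cases h : ((rows.map (fun r => r.getD i ' ')).count '1' : Int)
          ≥ (input.length : Int) - (rows.map (fun r => r.getD i ' ')).count '1'
      · rw [if_pos h, if_pos h]; ring
      · rw [if_neg h, if_neg h]; ring
  have hlenL : L.length = m := by simp [hL]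
  have hc := pv_fold_compl n L 0 0
  rw [hlenL] at hc
  have he : L.foldl (fun e k => if k ≥ n - k then e * 2 else e * 2 + 1) (0 : Int)
      = (2 ^ m : Int) - 1 - L.foldl (fun d k => if k ≥ n - k then d * 2 + 1 else d * 2) (0 : Int) := by
    linarith [hc]
  rw [he, hdelta]
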